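-- pv_equiv track=rewrite | github.com/ismailakdag/afsuamprotocol | measurement.py | _preferred_mcu_port
-- ===== SOURCE A (Python) =====
-- def _preferred_mcu_port(available_ports):
--     """
--     Priority:
--     1) /dev/cu.usbmodem1201
--     2) /dev/cu/.usbmodem1201 (as requested)
--     3) any port containing 'usbmodem1201'
--     4) first available
--     """
--     if not available_ports:
--         return None
--
--     exact_1 = "/dev/cu.usbmodem1201"
--     exact_2 = "/dev/cu/.usbmodem1201"
--
--     if exact_1 in available_ports:
--         return exact_1
--     if exact_2 in available_ports:
--         return exact_2
--
--     for p in available_ports: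
--         if "usbmodem1201" in p:
--             return p
--
--     return available_ports[0]
-- ===== SOURCE B (Python) =====
-- def _preferred_mcu_port(available_ports):
--     """Single-pass selection: pick the first port of minimal priority rank."""
--     if not available_ports:
--         return None
--
--     def rank(p):
--         if p == "/dev/cu.usbmodem1201":
--             return 0
--         if p == "/dev/cu/.usbmodem1201":
--             return 1
--         return 2 if "usbmodem1201" in p else 3
--
--     return min(available_ports, key=rank)
-- ===== Notes on version B (the rewrite author's own statement) =====
-- stated objective: alternative
-- what changed: Replaces the multi-tier early-return scans (two membership tests plus a substring loop plus a fallback) with a single pass that returns the first element of minimal priority rank via min(..., key=rank).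
import Mathlib
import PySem

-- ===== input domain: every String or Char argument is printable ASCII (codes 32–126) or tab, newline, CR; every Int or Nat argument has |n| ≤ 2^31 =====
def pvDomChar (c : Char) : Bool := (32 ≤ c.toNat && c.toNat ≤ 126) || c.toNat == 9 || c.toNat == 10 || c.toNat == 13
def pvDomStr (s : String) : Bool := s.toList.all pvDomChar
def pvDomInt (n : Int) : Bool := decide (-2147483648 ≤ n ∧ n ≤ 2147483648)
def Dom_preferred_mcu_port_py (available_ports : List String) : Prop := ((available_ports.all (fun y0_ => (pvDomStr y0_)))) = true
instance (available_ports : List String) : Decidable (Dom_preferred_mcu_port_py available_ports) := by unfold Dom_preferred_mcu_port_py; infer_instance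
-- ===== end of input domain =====

-- B replaces A's multi-tier early-return scans with one pass picking the first
-- element of minimal priority rank (objective: alternative, same cost).

-- ===== PORT A =====
def preferred_mcu_port_py (available_ports : List String) : Option String :=
  if available_ports = [] then none
  else
    let exact_1 := "/dev/cu.usbmodem1201"
    let exact_2 := "/dev/cu/.usbmodem1201"
    if exact_1 ∈ available_ports then some exact_1
    else if exact_2 ∈ available_ports then some exact_2
    else
      match available_ports.find? (fun p => PySem.Str.isIn "usbmodem1201" p) with
      | some p => some p
      | none => PySem.List.pyGet? available_ports 0

-- ===== PORT B =====
def pvRank (p : String) : Nat :=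
  if p = "/dev/cu.usbmodem1201" then 0
  else if p = "/dev/cu/.usbmodem1201" then 1
  else if PySem.Str.isIn "usbmodem1201" p then 2 else 3

def preferred_mcu_port_py_alt (available_ports : List String) : Option String :=
  if available_ports = [] then none
  else PySem.List.min? available_ports pvRank

-- ===== PRECONDITION & SPEC =====
def Spec_preferred_mcu_port_py (available_ports : List String) (out : Option String) : Prop := out = preferred_mcu_port_py_alt available_ports
instance (available_ports : List String) (out : Option String) : Decidable (Spec_preferred_mcu_port_py available_ports out) := by unfold Spec_preferred_mcu_port_py; infer_instance

-- ===== CLAIM (what is proved, stated in full; the proofs are below) =====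
def Claim_equal_preferred_mcu_port_py : Prop := ∀ (available_ports : List String), Dom_preferred_mcu_port_py available_ports → Spec_preferred_mcu_port_py available_ports (preferred_mcu_port_py available_ports)

-- ===== LEMMAS AND PROOFS =====

-- min?'s folding step, written out so the lemmas below can name it
def pvStep {α : Type} (key : α → Nat) (acc : Option α) (x : α) : Option α :=
  match acc with
  | none => some x
  | some m' => if key x < key m' then some x else some m'

-- once the running minimum m is reached, no later element with key ≥ key m displaces it
theorem pv_foldl_keep {α : Type} (key : α → Nat) (m : α) (xs : List α)
    (h : ∀ y ∈ xs, key m ≤ key y) :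
    xs.foldl (pvStep key) (some m) = some m := by
  induction xs with
  | nil => rfl
  | cons y t ih =>
    have hy : ¬ key y < key m := by
      have := h y (by simp)
      omega
    simp only [List.foldl_cons, pvStep, if_neg hy]
    exact ih (fun z hz => h z (by simp [hz]))

-- min? returns m when everything before its occurrence has strictly larger key
-- and everything after has key at least key m (Python min's first-minimum rule)
theorem pv_min?_first {α : Type} (key : α → Nat) (pre suf : List α) (m : α)
    (hpre : ∀ y ∈ pre, key m < key y) (hsuf : ∀ y ∈ suf, key m ≤ key y) :
    PySem.List.min? (pre ++ m :: suf) key = some m := by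
  show List.foldl (pvStep key) none (pre ++ m :: suf) = some m
  rw [List.foldl_append]
  have hacc : List.foldl (pvStep key) none pre = PySem.List.min? pre key := rfl
  rw [hacc]
  cases h : PySem.List.min? pre key with
  | none =>
    simp only [List.foldl_cons]
    exact pv_foldl_keep key m suf hsuf
  | some p =>
    have hp : p ∈ pre := PySem.List.min?_mem h
    have hlt : key m < key p := hpre p hp
    have hstep : pvStep key (some p) m = some m := by
      simp only [pvStep, if_pos hlt]
    simp only [List.foldl_cons, hstep]
    exact pv_foldl_keep key m suf hsuf

theorem pv_rank_pos {y : String} (h1 : y ≠ "/dev/cu.usbmodem1201") : 1 ≤ pvRank y := by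
  unfold pvRank
  rw [if_neg h1]
  split_ifs <;> omega

theorem pv_rank_ge2 {y : String} (h1 : y ≠ "/dev/cu.usbmodem1201")
    (h2 : y ≠ "/dev/cu/.usbmodem1201") : 2 ≤ pvRank y := by
  unfold pvRank
  rw [if_neg h1, if_neg h2]
  split_ifs <;> omega

theorem pv_rank_eq3 {y : String} (h1 : y ≠ "/dev/cu.usbmodem1201")
    (h2 : y ≠ "/dev/cu/.usbmodem1201")
    (h3 : PySem.Str.isIn "usbmodem1201" y = false) : pvRank y = 3 := by
  unfold pvRank
  rw [if_neg h1, if_neg h2, if_neg (by rw [h3]; simp)]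

theorem pv_rank_le3 (y : String) : pvRank y ≤ 3 := by
  unfold pvRank
  split_ifs <;> omega

theorem pv_rank_eq2 {y : String} (h1 : y ≠ "/dev/cu.usbmodem1201")
    (h2 : y ≠ "/dev/cu/.usbmodem1201")
    (h3 : PySem.Str.isIn "usbmodem1201" y = true) : pvRank y = 2 := by
  unfold pvRank
  rw [if_neg h1, if_neg h2, if_pos h3]

-- ===== VERDICT (by name: the statement is the Claim_ definition above) =====
theorem preferred_mcu_port_py_spec : Claim_equal_preferred_mcu_port_py := by
  intro ap _
  unfold Spec_preferred_mcu_port_py preferred_mcu_port_py preferred_mcu_port_py_alt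
  by_cases hnil : ap = []
  · simp [hnil]
  · simp only [if_neg hnil]
    by_cases h1 : ("/dev/cu.usbmodem1201" : String) ∈ ap
    · -- exact_1 present: the first occurrence wins in both
      have hidx : (PySem.List.index? ap ("/dev/cu.usbmodem1201" : String)).isSome := by
        rw [PySem.List.index?_isSome_iff]; exact h1
      obtain ⟨k, hk⟩ := Option.isSome_iff_exists.mp hidx
      obtain ⟨pre, suf, hx, _, hnotin⟩ := (PySem.List.index?_eq_some_iff _ _ _).mp hk
      rw [if_pos h1, hx]
      rw [pv_min?_first pvRank pre suf _
        (fun y hy => by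
          have hy1 : y ≠ "/dev/cu.usbmodem1201" := fun he => hnotin (he ▸ hy)
          have := pv_rank_pos hy1
          have h0 : pvRank "/dev/cu.usbmodem1201" = 0 := by decide
          omega)
        (fun y _ => Nat.zero_le _)]
    · rw [if_neg h1]
      by_cases h2 : ("/dev/cu/.usbmodem1201" : String) ∈ ap
      · have hidx : (PySem.List.index? ap ("/dev/cu/.usbmodem1201" : String)).isSome := by
          rw [PySem.List.index?_isSome_iff]; exact h2
        obtain ⟨k, hk⟩ := Option.isSome_iff_exists.mp hidx
        obtain ⟨pre, suf, hx, _, hnotin⟩ := (PySem.List.index?_eq_some_iff _ _ _).mp hk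
        rw [if_pos h2, hx]
        have hr1 : pvRank "/dev/cu/.usbmodem1201" = 1 := by decide
        rw [pv_min?_first pvRank pre suf _
          (fun y hy => by
            have hy2 : y ≠ "/dev/cu/.usbmodem1201" := fun he => hnotin (he ▸ hy)
            have hy1 : y ≠ "/dev/cu.usbmodem1201" := fun he => h1 (he ▸ (hx ▸ List.mem_append_left _ hy))
            have := pv_rank_ge2 hy1 hy2
            omega)
          (fun y hy => by
            have hy1 : y ≠ "/dev/cu.usbmodem1201" := fun he =>
              h1 (he ▸ (hx ▸ List.mem_append_right _ (List.mem_cons_of_mem _ hy)))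
            have := pv_rank_pos hy1
            omega)]
      · rw [if_neg h2]
        cases hf : ap.find? (fun p => PySem.Str.isIn "usbmodem1201" p) with
        | some p =>
          obtain ⟨hp, pre, suf, hx, hpre⟩ := List.find?_eq_some_iff_append.mp hf
          have hp1 : p ≠ "/dev/cu.usbmodem1201" := fun he =>
            h1 (he ▸ (hx ▸ List.mem_append_right _ (List.mem_cons_self)))
          have hp2 : p ≠ "/dev/cu/.usbmodem1201" := fun he =>
            h2 (he ▸ (hx ▸ List.mem_append_right _ (List.mem_cons_self)))
          have hrp : pvRank p = 2 := pv_rank_eq2 hp1 hp2 hp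
          rw [hx]
          rw [pv_min?_first pvRank pre suf _
            (fun y hy => by
              have hy1 : y ≠ "/dev/cu.usbmodem1201" := fun he =>
                h1 (he ▸ (hx ▸ List.mem_append_left _ hy))
              have hy2 : y ≠ "/dev/cu/.usbmodem1201" := fun he =>
                h2 (he ▸ (hx ▸ List.mem_append_left _ hy))
              have hy3 : PySem.Str.isIn "usbmodem1201" y = false := by
                have := hpre y hy; simpa using this
              have := pv_rank_eq3 hy1 hy2 hy3
              omega)
            (fun y hy => by
              have hy1 : y ≠ "/dev/cu.usbmodem1201" := fun he =>
                h1 (he ▸ (hx ▸ List.mem_append_right _ (List.mem_cons_of_mem _ hy)))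
              have hy2 : y ≠ "/dev/cu/.usbmodem1201" := fun he =>
                h2 (he ▸ (hx ▸ List.mem_append_right _ (List.mem_cons_of_mem _ hy)))
              have := pv_rank_ge2 hy1 hy2
              omega)]
        | none =>
          have hall := List.find?_eq_none.mp hf
          obtain ⟨m, t, hx⟩ := List.exists_cons_of_ne_nil hnil
          subst hx
          have hsuf : ∀ y ∈ m :: t, pvRank m ≤ pvRank y := by
            intro y hy
            have hyne1 : y ≠ "/dev/cu.usbmodem1201" := fun he => h1 (he ▸ hy)
            have hyne2 : y ≠ "/dev/cu/.usbmodem1201" := fun he => h2 (he ▸ hy)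
            have hy3 : PySem.Str.isIn "usbmodem1201" y = false := by
              have := hall y hy; simpa using this
            have h3y := pv_rank_eq3 hyne1 hyne2 hy3
            have hle := pv_rank_le3 m
            omega
          have : PySem.List.min? (([] : List String) ++ m :: t) pvRank = some m :=
            pv_min?_first pvRank [] t m (by simp)
              (fun y hy => hsuf y (List.mem_cons_of_mem _ hy))
          simp only [List.nil_append] at this
          rw [this]
          simp [PySem.List.pyGet?, PySem.List.pyIdx?]
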